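-- pv_equiv track=rewrite | github.com/alanaldrin013/csa533 | quantum_crypto.py | generate_bases
-- ===== SOURCE A (Python) =====
-- def generate_bases(n):
--
--     bases = []
--
--     for i in range(n):
--
--         if i % 2 == 0:
--             bases.append('+')
--         else:
--             bases.append('x')
--
--     return bases
-- ===== SOURCE B (Python) =====
-- def generate_bases(n):
--     bases = ['+', 'x'] * ((n + 1) // 2)
--     return bases[:n]
-- ===== Notes on version B (the rewrite author's own statement) =====
-- stated objective: simpler
-- what changed: Replaces the per-element loop with its parity branch by tiling the pattern ['+','x'] enough times and slicing the tiled list to length n.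
import Mathlib
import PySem

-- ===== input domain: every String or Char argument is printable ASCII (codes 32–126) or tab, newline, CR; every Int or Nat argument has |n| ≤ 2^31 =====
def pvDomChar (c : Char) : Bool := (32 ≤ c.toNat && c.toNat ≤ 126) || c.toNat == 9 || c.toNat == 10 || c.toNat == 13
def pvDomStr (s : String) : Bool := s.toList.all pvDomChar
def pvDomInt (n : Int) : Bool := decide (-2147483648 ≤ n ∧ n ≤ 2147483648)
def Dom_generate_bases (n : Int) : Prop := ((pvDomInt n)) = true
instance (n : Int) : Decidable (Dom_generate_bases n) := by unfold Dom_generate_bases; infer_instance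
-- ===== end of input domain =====

-- B replaces A's per-element loop with parity branch by tiling ['+','x'] and slicing to length n (objective: simpler).

-- ===== PORT A =====
def generate_bases (n : Int) : List String :=
  (PySem.List.pyRange 0 n 1).foldl
    (fun bases i => if PySem.Int.mod i 2 == 0 then bases ++ ["+"] else bases ++ ["x"]) []

-- ===== PORT B =====
def generate_bases_alt (n : Int) : List String :=
  let bases := (List.replicate (PySem.Int.floordiv (n + 1) 2).toNat ["+", "x"]).flatten
  PySem.List.slice bases none (some n)

-- ===== PRECONDITION & SPEC =====
def Spec_generate_bases (n : Int) (out : List String) : Prop := out = generate_bases_alt n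
instance (n : Int) (out : List String) : Decidable (Spec_generate_bases n out) := by unfold Spec_generate_bases; infer_instance

-- ===== CLAIM (what is proved, stated in full; the proofs are below) =====
def Claim_equal_generate_bases : Prop := ∀ (n : Int), Dom_generate_bases n → Spec_generate_bases n (generate_bases n)

-- ===== LEMMAS AND PROOFS =====

theorem foldl_snoc_map (l : List Int) (acc : List String) :
    l.foldl (fun a i => if PySem.Int.mod i 2 == 0 then a ++ ["+"] else a ++ ["x"]) acc
      = acc ++ l.map (fun i => if PySem.Int.mod i 2 == 0 then "+" else "x") := by
  induction l generalizing acc with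
  | nil => simp
  | cons x xs ih =>
    simp only [List.foldl_cons, List.map_cons]
    split_ifs <;> rw [ih] <;> simp

theorem flatten_replicate_pattern (j : Nat) :
    (List.replicate j ["+", "x"]).flatten
      = (List.range (2 * j)).map (fun k => if k % 2 = 0 then "+" else "x") := by
  induction j with
  | zero => simp
  | succ j ih =>
    rw [List.replicate_succ', List.flatten_append, ih]
    have h2 : 2 * (j + 1) = (2 * j + 1) + 1 := by omega
    rw [h2, List.range_succ, List.range_succ, List.map_append, List.map_append]
    have h0 : (2 * j) % 2 = 0 := by omega
    have h1 : (2 * j + 1) % 2 = 1 := by omega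
    simp [h0, h1]

theorem generate_bases_nat (m : Nat) :
    generate_bases (m : Int) = (List.range m).map (fun k => if k % 2 = 0 then "+" else "x") := by
  unfold generate_bases
  rw [PySem.List.pyRange_one, foldl_snoc_map]
  simp only [List.nil_append, Int.sub_zero, Int.toNat_natCast, List.map_map]
  apply List.map_congr_left
  intro k _
  have : PySem.Int.mod ((0 : Int) + (k : Int)) 2 = ((k % 2 : Nat) : Int) := by
    rw [Int.zero_add]; exact PySem.Int.mod_natCast k 2
  simp only [Function.comp, this]
  rcases Nat.mod_two_eq_zero_or_one k with h | h <;> simp [h]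

theorem generate_bases_alt_nat (m : Nat) :
    generate_bases_alt (m : Int) = (List.range m).map (fun k => if k % 2 = 0 then "+" else "x") := by
  unfold generate_bases_alt
  have hfd : PySem.Int.floordiv ((m : Int) + 1) 2 = (((m + 1) / 2 : Nat) : Int) := by
    have : ((m : Int) + 1) = ((m + 1 : Nat) : Int) := by push_cast; ring
    rw [this]; exact PySem.Int.floordiv_natCast (m + 1) 2
  rw [hfd]
  simp only [Int.toNat_natCast]
  rw [flatten_replicate_pattern, PySem.List.slice_to_natCast]
  rw [← List.map_take, List.take_range]
  have hmin : min m (2 * ((m + 1) / 2)) = m := by omega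
  rw [hmin]

theorem generate_bases_spec : Claim_equal_generate_bases := by
  intro n _
  unfold Spec_generate_bases
  by_cases h : 0 ≤ n
  · obtain ⟨m, rfl⟩ := Int.eq_ofNat_of_zero_le h
    rw [generate_bases_nat, generate_bases_alt_nat]
  · -- here n < 0: both sides are empty
    have hA : generate_bases n = [] := by
      unfold generate_bases
      rw [PySem.List.pyRange_one_eq_nil (by omega)]
      rfl
    have hfd : (PySem.Int.floordiv (n + 1) 2).toNat = 0 := by
      have hle : PySem.Int.floordiv (n + 1) 2 ≤ 0 := by
        rw [PySem.Int.floordiv_eq_ediv_of_pos (by omega)]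
        omega
      omega
    have hB : generate_bases_alt n = [] := by
      unfold generate_bases_alt
      rw [hfd]
      simp [PySem.List.slice]
    rw [hA, hB]
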